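-- pv_equiv track=rewrite | github.com/Infosys/Document-Extraction-Libraries | infy_table_extractor/src/infy_table_extractor/borderless_table_extractor/internal/internal_converter.py | remove_blank_rows
-- ===== SOURCE A (Python) =====
-- def remove_blank_rows(table):
--     # find max row number in table
--     row_count = 0
--     for cell in table:
--         if (row_count < cell[0]):
--             row_count = cell[0]
--
--     new_table = []
--     new_row_num = 0
--     for row_num in range(row_count+1):
--         row_exists_in_table = False
--         # if cell found with current row number, update new_row_num; new_row_num counter is incremented only when at least one cell for a row is detected
--         for cell in table:
--             if (row_num == cell[0]):
--                 row_exists_in_table = True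
--                 cell[0] = new_row_num
--                 new_table.append(cell)
--         if (row_exists_in_table == True):
--             new_row_num += 1
--     return new_table
-- ===== SOURCE B (Python) =====
-- def remove_blank_rows(table):
--     # Stable sort the cells by row index (dropping rows < 0, which A never visits),
--     # then renumber in one consecutive pass. Mutates cell[0] in place, like A.
--     cells = sorted((c for c in table if c[0] >= 0), key=lambda c: c[0])
--     out = []
--     new_row_num = -1
--     prev = None
--     for c in cells:
--         if prev != c[0]:
--             prev = c[0]
--             new_row_num += 1
--         c[0] = new_row_num
--         out.append(c)
--     return out
-- ===== Notes on version B (the rewrite author's own statement) =====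
-- stated objective: faster
-- what changed: Replaces A's scan of the whole cell list once per row index 0..max_row with a single stable sort of the cells by row index followed by one consecutive-renumbering pass.
import Mathlib
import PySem

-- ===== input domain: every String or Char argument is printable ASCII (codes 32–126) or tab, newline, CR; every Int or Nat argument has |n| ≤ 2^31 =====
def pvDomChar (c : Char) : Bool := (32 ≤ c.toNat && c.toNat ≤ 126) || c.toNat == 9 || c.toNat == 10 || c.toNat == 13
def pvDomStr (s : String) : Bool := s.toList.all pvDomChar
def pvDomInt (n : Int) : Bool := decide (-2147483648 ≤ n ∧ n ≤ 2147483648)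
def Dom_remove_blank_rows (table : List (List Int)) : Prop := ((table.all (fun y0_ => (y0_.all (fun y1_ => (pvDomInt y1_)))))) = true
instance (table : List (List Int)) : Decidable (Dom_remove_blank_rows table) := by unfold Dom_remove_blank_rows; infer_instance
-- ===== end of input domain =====

-- B replaces A's per-row scans (one pass over all cells for every row index 0..max) by a single
-- stable sort of the cells by row index followed by one consecutive-renumbering pass; both mutate
-- the kept cells' row entries in place in Python, and the equivalence proved is about the return value.


-- ===== PORT A =====
-- cell[0] raises IndexError on an empty cell; Pre_ excludes those, so 'headD 0' is exact on Pre_.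
def remove_blank_rows (table : List (List Int)) : List (List Int) :=
  let row_count : Int :=
    table.foldl (fun rc cell => if rc < cell.headD 0 then cell.headD 0 else rc) 0
  let fin :=
    (PySem.List.pyRange 0 (row_count + 1) 1).foldl
      (fun (st : List (List Int) × List (List Int) × Int) row_num =>
        let inner :=
          st.1.foldl
            (fun (t : List (List Int) × List (List Int) × Bool) cell =>
              if row_num == cell.headD 0 then
                (t.1 ++ [st.2.2 :: cell.tail], t.2.1 ++ [st.2.2 :: cell.tail], true)
              else
                (t.1 ++ [cell], t.2.1, t.2.2))
            ([], st.2.1, false)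
        (inner.1, inner.2.1, if inner.2.2 then st.2.2 + 1 else st.2.2))
      (table, [], 0)
  fin.2.1

-- ===== PORT B =====
def remove_blank_rows_alt (table : List (List Int)) : List (List Int) :=
  let cells :=
    PySem.List.sorted (table.filter (fun c => decide (0 ≤ c.headD 0))) (fun c => c.headD 0)
  let fin :=
    cells.foldl
      (fun (st : List (List Int) × Int × Option Int) c =>
        let np : Int × Option Int :=
          if st.2.2 ≠ some (c.headD 0) then (st.2.1 + 1, some (c.headD 0)) else (st.2.1, st.2.2)
        (st.1 ++ [np.1 :: c.tail], np.1, np.2))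
      ([], -1, none)
  fin.1

-- ===== PRECONDITION & SPEC =====
-- Pre_ excludes tables containing an empty cell: there Python A raises IndexError on cell[0] (B does too).
def Pre_remove_blank_rows (table : List (List Int)) : Prop := ∀ c ∈ table, c ≠ []
instance (table : List (List Int)) : Decidable (Pre_remove_blank_rows table) := by
  unfold Pre_remove_blank_rows; infer_instance
def pvWitness_remove_blank_rows : List (List Int) := [[2, 7], [0, 1], [2, 5]]
def Spec_remove_blank_rows (table : List (List Int)) (out : List (List Int)) : Prop := out = remove_blank_rows_alt table
instance (table : List (List Int)) (out : List (List Int)) : Decidable (Spec_remove_blank_rows table out) := by unfold Spec_remove_blank_rows; infer_instance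

-- ===== CLAIM (what is proved, stated in full; the proofs are below) =====
def Claim_equal_remove_blank_rows : Prop := ∀ (table : List (List Int)), Dom_remove_blank_rows table → Pre_remove_blank_rows table → Spec_remove_blank_rows table (remove_blank_rows table)

-- ===== LEMMAS AND PROOFS =====

-- row index of a cell
def rkey (c : List Int) : Int := c.headD 0

-- the cells of `table` whose row index is r, in order
def grp (table : List (List Int)) (r : Int) : List (List Int) :=
  table.filter (fun c => rkey c == r)

-- does row r occur in table?
def pres (table : List (List Int)) (r : Int) : Bool :=
  table.any (fun c => rkey c == r)

-- number of present rows with index < n (the new row number assigned to row n)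
def idx (table : List (List Int)) (n : Nat) : Int :=
  (((List.range n).countP (fun j => pres table (Int.ofNat j)) : Nat) : Int)

-- the output accumulated after processing rows 0..n-1
def NT (table : List (List Int)) (n : Nat) : List (List Int) :=
  (List.range n).flatMap (fun r => (grp table (Int.ofNat r)).map (fun c => idx table r :: c.tail))

-- A's mutated table after processing rows 0..n-1
def TT (table : List (List Int)) (n : Nat) : List (List Int) :=
  table.map (fun c => if 0 ≤ rkey c ∧ rkey c < (n : Int) then idx table (rkey c).toNat :: c.tail else c)

-- the last present row index < n, as B's `prev`
def prevOf (table : List (List Int)) : Nat → Option Int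
  | 0 => none
  | n + 1 => if pres table (Int.ofNat n) then some (Int.ofNat n) else prevOf table n

-- groups by key = flatMap of filters over range n
def Gf (xs : List (List Int)) (n : Nat) : List (List Int) :=
  (List.range n).flatMap (fun r => xs.filter (fun c => c.headD 0 == Int.ofNat r))


theorem idx_le (table : List (List Int)) (n : Nat) : idx table n ≤ (n : Int) := by
  unfold idx
  have h : ((List.range n).countP (fun j => pres table (Int.ofNat j))) ≤ n := by
    simpa using List.countP_le_length (l := List.range n) (p := fun j => pres table (Int.ofNat j))
  exact_mod_cast h

theorem innerA (row nrn : Int) (tbl nt acc : List (List Int)) (b : Bool) :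
    tbl.foldl
      (fun (t : List (List Int) × List (List Int) × Bool) cell =>
        if row == cell.headD 0 then
          (t.1 ++ [nrn :: cell.tail], t.2.1 ++ [nrn :: cell.tail], true)
        else
          (t.1 ++ [cell], t.2.1, t.2.2))
      (acc, nt, b)
    = (acc ++ tbl.map (fun c => if rkey c == row then nrn :: c.tail else c),
       nt ++ (tbl.filter (fun c => rkey c == row)).map (fun c => nrn :: c.tail),
       b || tbl.any (fun c => rkey c == row)) := by
  induction tbl generalizing acc nt b with
  | nil => simp
  | cons c t ih =>
    simp only [List.foldl_cons]
    by_cases h : row = c.headD 0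
    · rw [if_pos (by simpa using h), ih]
      have hc : rkey c = row := h.symm
      simp [List.any_cons, hc, List.append_assoc]
    · rw [if_neg (by simpa using h), ih]
      have hc : (rkey c == row) = false := beq_eq_false_iff_ne.mpr (fun hh => h hh.symm)
      simp [List.any_cons, hc, beq_eq_false_iff_ne.mp hc, List.append_assoc]

-- the step function of A's outer loop
def stepA (st : List (List Int) × List (List Int) × Int) (row_num : Int) :
    List (List Int) × List (List Int) × Int :=
  let inner :=
    st.1.foldl
      (fun (t : List (List Int) × List (List Int) × Bool) cell =>
        if row_num == cell.headD 0 then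
          (t.1 ++ [st.2.2 :: cell.tail], t.2.1 ++ [st.2.2 :: cell.tail], true)
        else
          (t.1 ++ [cell], t.2.1, t.2.2))
      ([], st.2.1, false)
  (inner.1, inner.2.1, if inner.2.2 then st.2.2 + 1 else st.2.2)

theorem gkey (table : List (List Int)) (n : Nat) (c : List Int) :
    (rkey (if 0 ≤ rkey c ∧ rkey c < (n : Int) then idx table (rkey c).toNat :: c.tail else c)
      == (n : Int)) = (rkey c == (n : Int)) := by
  by_cases h0 : 0 ≤ rkey c ∧ rkey c < (n : Int)
  · rw [if_pos h0]
    have hidx : idx table (rkey c).toNat ≤ rkey c := by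
      have h := idx_le table (rkey c).toNat
      rwa [Int.toNat_of_nonneg h0.1] at h
    have h2 : ¬ idx table (rkey c).toNat = (n : Int) := by omega
    have h3 : ¬ rkey c = (n : Int) := by omega
    show (idx table (rkey c).toNat == (n : Int)) = (rkey c == (n : Int))
    simp [h2, h3]
  · rw [if_neg h0]

theorem TT_succ (table : List (List Int)) (n : Nat) :
    (TT table n).map (fun c => if rkey c == (n : Int) then idx table n :: c.tail else c)
      = TT table (n + 1) := by
  unfold TT
  rw [List.map_map]
  refine List.map_congr_left ?_
  intro c _
  simp only [Function.comp_apply]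
  by_cases h0 : 0 ≤ rkey c ∧ rkey c < (n : Int)
  · rw [if_pos h0]
    have hidx : idx table (rkey c).toNat ≤ rkey c := by
      have h := idx_le table (rkey c).toNat
      rwa [Int.toNat_of_nonneg h0.1] at h
    have hne : ¬ (idx table (rkey c).toNat = (n : Int)) := by omega
    rw [if_neg (by simpa using hne)]
    rw [if_pos ⟨h0.1, by push_cast; omega⟩]
  · rw [if_neg h0]
    by_cases hn : rkey c = (n : Int)
    · rw [if_pos (by simpa using hn)]
      rw [if_pos ⟨by omega, by push_cast; omega⟩]
      have ht : (rkey c).toNat = n := by omega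
      rw [ht]
    · rw [if_neg (by simpa using hn)]
      rw [if_neg (by push_cast; omega)]

theorem filter_TT (table : List (List Int)) (n : Nat) :
    (TT table n).filter (fun c => rkey c == (n : Int)) = grp table (n : Int) := by
  unfold TT grp
  rw [List.filter_map]
  have hfun : ((fun c => rkey c == (n : Int)) ∘
      (fun c => if 0 ≤ rkey c ∧ rkey c < (n : Int) then idx table (rkey c).toNat :: c.tail else c))
      = (fun c => rkey c == (n : Int)) := funext (fun c => gkey table n c)
  rw [hfun]
  refine (List.map_congr_left ?_).trans (List.map_id _)
  intro c hc
  have h : rkey c = (n : Int) := by simpa using (List.of_mem_filter hc)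
  rw [if_neg (by omega)]
  rfl

theorem any_TT (table : List (List Int)) (n : Nat) :
    (TT table n).any (fun c => rkey c == (n : Int)) = pres table (n : Int) := by
  unfold TT pres
  rw [List.any_map]
  have hfun : ((fun c => rkey c == (n : Int)) ∘
      (fun c => if 0 ≤ rkey c ∧ rkey c < (n : Int) then idx table (rkey c).toNat :: c.tail else c))
      = (fun c => rkey c == (n : Int)) := funext (fun c => gkey table n c)
  rw [hfun]

theorem idx_succ (table : List (List Int)) (n : Nat) :
    idx table (n + 1) = if pres table (n : Int) then idx table n + 1 else idx table n := by
  unfold idx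
  rw [List.range_succ, List.countP_append]
  by_cases h : pres table (n : Int) <;> simp [h]

theorem NT_succ (table : List (List Int)) (n : Nat) :
    NT table (n + 1) = NT table n ++ (grp table (n : Int)).map (fun c => idx table n :: c.tail) := by
  unfold NT
  rw [List.range_succ, List.flatMap_append]
  simp [Int.ofNat_eq_natCast]

theorem outerA (table : List (List Int)) (n : Nat) :
    ((List.range n).map Int.ofNat).foldl stepA (table, [], 0)
      = (TT table n, NT table n, idx table n) := by
  induction n with
  | zero =>
    have hTT : TT table 0 = table := by
      unfold TT
      refine (List.map_congr_left ?_).trans (List.map_id _)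
      intro c _
      rw [if_neg (by omega)]
      rfl
    simp [hTT, NT, idx]
  | succ n ih =>
    rw [List.range_succ, List.map_append, List.foldl_append, ih]
    simp only [List.map_cons, List.map_nil, List.foldl_cons, List.foldl_nil]
    unfold stepA
    simp only []
    rw [innerA]
    simp only [List.nil_append, Int.ofNat_eq_natCast, Bool.false_or]
    rw [TT_succ, filter_TT, any_TT, NT_succ, idx_succ]

-- ===== B-side lemmas =====

theorem insertBy_append_left (bf : List Int → List Int → Bool) (x : List Int)
    (A B : List (List Int)) (hB : ∀ b ∈ B, bf x b = true) :
    PySem.List.insertBy bf x (A ++ B) = PySem.List.insertBy bf x A ++ B := by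
  induction A with
  | nil =>
    cases B with
    | nil => simp
    | cons b t =>
      simp [PySem.List.insertBy, hB b (by simp)]
  | cons a A ih =>
    by_cases h : bf x a
    · simp [PySem.List.insertBy, h]
    · simp only [List.cons_append, PySem.List.insertBy, h, Bool.false_eq_true, if_neg,
        not_false_iff]
      rw [ih]

theorem mem_Gf_lt (xs : List (List Int)) (m : Nat) (a : List Int) (ha : a ∈ Gf xs m) :
    a.headD 0 < (m : Int) := by
  unfold Gf at ha
  rw [List.mem_flatMap] at ha
  obtain ⟨r, hr, hmem⟩ := ha
  have h1 : a.headD 0 = (r : Int) := by simpa using (List.of_mem_filter hmem)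
  have h2 : r < m := List.mem_range.mp hr
  omega

theorem Gf_append_out (xs : List (List Int)) (x : List Int) (m : Nat)
    (hx : x.headD 0 < 0 ∨ (m : Int) ≤ x.headD 0) :
    Gf (xs ++ [x]) m = Gf xs m := by
  unfold Gf
  refine List.flatMap_congr ?_
  intro r hr
  have hrm : r < m := List.mem_range.mp hr
  rw [List.filter_append]
  have hnil : [x].filter (fun c => c.headD 0 == Int.ofNat r) = [] := by
    simp only [List.filter_cons, List.filter_nil]
    rw [if_neg (by simp only [beq_iff_eq, Int.ofNat_eq_natCast]; omega)]
  rw [hnil, List.append_nil]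

theorem insert_group (x : List Int) (n : Nat) (h0 : 0 ≤ x.headD 0) (hn : x.headD 0 < (n : Int))
    (xs : List (List Int)) :
    PySem.List.insertBy (fun a b => decide (a.headD 0 < b.headD 0)) x (Gf xs n)
      = Gf (xs ++ [x]) n := by
  induction n with
  | zero => exact absurd hn (by omega)
  | succ n ih =>
    have hGsucc : ∀ ys : List (List Int), Gf ys (n+1) = Gf ys n ++ ys.filter (fun c => c.headD 0 == (n : Int)) := by
      intro ys
      unfold Gf
      rw [List.range_succ, List.flatMap_append]
      simp
    by_cases hx : x.headD 0 = (n : Int)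
    · rw [hGsucc xs, hGsucc (xs ++ [x])]
      rw [PySem.List.insertBy_of_forall_not_before]
      · rw [Gf_append_out xs x n (by omega)]
        rw [List.filter_append]
        have hfx : [x].filter (fun c => c.headD 0 == (n : Int)) = [x] := by
          simp only [List.filter_cons, List.filter_nil]
          rw [if_pos (beq_iff_eq.mpr hx)]
        rw [hfx, List.append_assoc]
      · intro y hy
        rcases List.mem_append.mp hy with hy1 | hy2
        · have := mem_Gf_lt xs n y hy1
          simp only [decide_eq_false_iff_not, not_lt]
          omega
        · have : y.headD 0 = (n : Int) := by simpa using (List.of_mem_filter hy2)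
          simp only [decide_eq_false_iff_not, not_lt]
          omega
    · have hxlt : x.headD 0 < (n : Int) := by push_cast at hn ⊢; omega
      rw [hGsucc xs, hGsucc (xs ++ [x])]
      rw [insertBy_append_left]
      · rw [ih hxlt]
        congr 1
        rw [List.filter_append]
        have hfx0 : [x].filter (fun c => c.headD 0 == (n : Int)) = [] := by
          simp only [List.filter_cons, List.filter_nil]
          rw [if_neg (by simp only [beq_iff_eq]; exact hx)]
        rw [hfx0, List.append_nil]
      · intro b hb
        have : b.headD 0 = (n : Int) := by simpa using (List.of_mem_filter hb)
        simp only [decide_eq_true_eq]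
        omega

theorem sortedGroups (xs : List (List Int)) (n : Nat)
    (h : ∀ x ∈ xs, 0 ≤ x.headD 0 ∧ x.headD 0 < (n : Int)) :
    PySem.List.sorted xs (fun c => c.headD 0) = Gf xs n := by
  induction xs using List.reverseRecOn with
  | nil =>
    simp [PySem.List.sorted_eq_foldl_insertBy, Gf, List.filter_nil]
  | append_singleton xs x ih =>
    rw [PySem.List.sorted_eq_foldl_insertBy, List.foldl_append, List.foldl_cons, List.foldl_nil,
      ← PySem.List.sorted_eq_foldl_insertBy]
    rw [ih (fun y hy => h y (by simp [hy]))]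
    exact insert_group x n (h x (by simp)).1 (h x (by simp)).2 xs

-- the step function of B's renumbering loop
def stepB (st : List (List Int) × Int × Option Int) (c : List Int) :
    List (List Int) × Int × Option Int :=
  let np : Int × Option Int :=
    if st.2.2 ≠ some (c.headD 0) then (st.2.1 + 1, some (c.headD 0)) else (st.2.1, st.2.2)
  (st.1 ++ [np.1 :: c.tail], np.1, np.2)

theorem foldB_same (g : List (List Int)) (r : Int) (hg : ∀ c ∈ g, c.headD 0 = r)
    (out : List (List Int)) (nrn : Int) :
    g.foldl stepB (out, nrn, some r)
      = (out ++ g.map (fun c => nrn :: c.tail), nrn, some r) := by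
  induction g generalizing out with
  | nil => simp
  | cons c t ih =>
    have hc : c.headD 0 = r := hg c (by simp)
    rw [List.foldl_cons]
    have hstep : stepB (out, nrn, some r) c = (out ++ [nrn :: c.tail], nrn, some r) := by
      unfold stepB
      rw [hc, if_neg (by simp)]
    rw [hstep, ih (fun c hc' => hg c (by simp [hc']))]
    simp [List.append_assoc]

theorem foldB_group (g : List (List Int)) (r : Int) (hg : ∀ c ∈ g, c.headD 0 = r)
    (hne : g ≠ []) (out : List (List Int)) (nrn : Int) (prev : Option Int)
    (hprev : prev ≠ some r) :
    g.foldl stepB (out, nrn, prev)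
      = (out ++ g.map (fun c => (nrn + 1) :: c.tail), nrn + 1, some r) := by
  cases g with
  | nil => exact absurd rfl hne
  | cons c t =>
    have hc : c.headD 0 = r := hg c (by simp)
    rw [List.foldl_cons]
    have hstep : stepB (out, nrn, prev) c = (out ++ [(nrn + 1) :: c.tail], nrn + 1, some r) := by
      unfold stepB
      rw [hc, if_pos (by simpa using (fun h => hprev h))]
    rw [hstep, foldB_same t r (fun c hc' => hg c (by simp [hc'])) _ _]
    simp [List.append_assoc]

theorem prevOf_lt (table : List (List Int)) (n : Nat) (r : Int)
    (h : prevOf table n = some r) : r < (n : Int) := by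
  induction n with
  | zero => simp [prevOf] at h
  | succ n ih =>
    unfold prevOf at h
    by_cases hp : pres table (Int.ofNat n)
    · rw [if_pos hp] at h
      have : r = (Int.ofNat n) := by simpa using h.symm
      simp only [Int.ofNat_eq_natCast] at this
      push_cast
      omega
    · rw [if_neg hp] at h
      have := ih h
      push_cast
      omega

theorem grp_ne_nil_iff (table : List (List Int)) (r : Int) :
    pres table r = true ↔ grp table r ≠ [] := by
  unfold pres grp
  rw [List.any_eq_true]
  constructor
  · rintro ⟨c, hc, hck⟩
    intro hnil
    have : c ∈ List.filter (fun c => rkey c == r) table := List.mem_filter.mpr ⟨hc, hck⟩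
    simp [hnil] at this
  · intro hne
    rcases List.exists_mem_of_ne_nil _ hne with ⟨c, hc⟩
    exact ⟨c, (List.mem_filter.mp hc).1, (List.mem_filter.mp hc).2⟩

theorem grp_heads (table : List (List Int)) (n : Nat) :
    ∀ c ∈ grp table (n : Int), c.headD 0 = (n : Int) := by
  intro c hc
  have := List.of_mem_filter hc
  simpa [rkey] using this

theorem outerB (table : List (List Int)) (n : Nat) :
    ((List.range n).flatMap (fun r => grp table (Int.ofNat r))).foldl stepB ([], -1, none)
      = (NT table n, idx table n - 1, prevOf table n) := by
  induction n with
  | zero => simp [NT, idx, prevOf]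
  | succ n ih =>
    rw [List.range_succ, List.flatMap_append]
    rw [List.foldl_append, ih]
    simp only [List.flatMap_cons, List.flatMap_nil, List.append_nil]
    by_cases hp : pres table (Int.ofNat n)
    · have hne : grp table (Int.ofNat n) ≠ [] := (grp_ne_nil_iff table _).mp hp
      have hprev : prevOf table n ≠ some (Int.ofNat n) := by
        intro h
        have := prevOf_lt table n _ h
        simp only [Int.ofNat_eq_natCast] at this
        omega
      rw [foldB_group _ (Int.ofNat n) (by simpa [Int.ofNat_eq_natCast] using grp_heads table n) hne _ _ _ hprev]
      rw [NT_succ, idx_succ]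
      simp only [Int.ofNat_eq_natCast] at hp ⊢
      rw [if_pos hp]
      unfold prevOf
      rw [if_pos (by simpa using hp)]
      simp only [Int.ofNat_eq_natCast, sub_add_cancel, add_sub_cancel_right]
    · have hnil : grp table (Int.ofNat n) = [] := by
        by_contra hne
        exact hp ((grp_ne_nil_iff table _).mpr hne)
      rw [hnil]
      simp only [List.foldl_nil]
      rw [NT_succ, idx_succ]
      simp only [Int.ofNat_eq_natCast] at hnil hp ⊢
      rw [if_neg hp, hnil]
      simp [prevOf, hp]

theorem rc_spec (table : List (List Int)) :
    0 ≤ table.foldl (fun (rc : Int) (cell : List Int) => if rc < cell.headD 0 then cell.headD 0 else rc) 0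
    ∧ ∀ c ∈ table, c.headD 0 ≤ table.foldl (fun (rc : Int) (cell : List Int) => if rc < cell.headD 0 then cell.headD 0 else rc) 0 := by
  have hcong : table.foldl (fun (rc : Int) (cell : List Int) => if rc < cell.headD 0 then cell.headD 0 else rc) 0
      = table.foldl (fun acc y => max acc (y.headD 0)) 0 :=
    PySem.List.foldl_congr_mem _ _ _ _ (by intro acc c _; omega)
  rw [hcong]
  exact ⟨(PySem.List.le_foldl_max_int table (fun c => c.headD 0) 0).1,
    (PySem.List.le_foldl_max_int table (fun c => c.headD 0) 0).2⟩

theorem A_eq_NT (table : List (List Int)) :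
    remove_blank_rows table
      = NT table ((table.foldl (fun (rc : Int) (cell : List Int) => if rc < cell.headD 0 then cell.headD 0 else rc) 0).toNat + 1) := by
  have hA : remove_blank_rows table
      = ((PySem.List.pyRange 0 ((table.foldl (fun (rc : Int) (cell : List Int) => if rc < cell.headD 0 then cell.headD 0 else rc) 0) + 1) 1).foldl
          stepA (table, [], 0)).2.1 := rfl
  rw [hA]
  obtain ⟨h0, -⟩ := rc_spec table
  have hcast : (table.foldl (fun (rc : Int) (cell : List Int) => if rc < cell.headD 0 then cell.headD 0 else rc) 0) + 1
      = ((((table.foldl (fun (rc : Int) (cell : List Int) => if rc < cell.headD 0 then cell.headD 0 else rc) 0).toNat + 1 : Nat)) : Int) := by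
    omega
  rw [hcast, PySem.List.pyRange_zero_natCast]
  have hfun : (fun k : Nat => (k : Int)) = Int.ofNat := rfl
  rw [hfun, outerA]

theorem filter_nonneg_grp (table : List (List Int)) (r : Nat) :
    (table.filter (fun c => decide (0 ≤ c.headD 0))).filter (fun c => c.headD 0 == Int.ofNat r)
      = grp table (Int.ofNat r) := by
  rw [List.filter_filter]
  unfold grp
  refine List.filter_congr ?_
  intro c _
  show (c.headD 0 == Int.ofNat r && decide (0 ≤ c.headD 0)) = (rkey c == Int.ofNat r)
  rcases eq_or_ne (c.headD 0) (Int.ofNat r) with h | h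
  · have h2 : c.head?.getD 0 = ((r : Nat) : Int) := by simpa using h
    simp [rkey, h2]
  · have h2 : ¬ c.head?.getD 0 = ((r : Nat) : Int) := by simpa using h
    simp [rkey, h2]

theorem B_eq_NT (table : List (List Int)) :
    remove_blank_rows_alt table
      = NT table ((table.foldl (fun (rc : Int) (cell : List Int) => if rc < cell.headD 0 then cell.headD 0 else rc) 0).toNat + 1) := by
  have hB : remove_blank_rows_alt table
      = ((PySem.List.sorted (table.filter (fun c => decide (0 ≤ c.headD 0))) (fun c => c.headD 0)).foldl
          stepB ([], -1, none)).1 := rfl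
  rw [hB]
  obtain ⟨h0, hle⟩ := rc_spec table
  rw [sortedGroups _ ((table.foldl (fun (rc : Int) (cell : List Int) => if rc < cell.headD 0 then cell.headD 0 else rc) 0).toNat + 1) ?_]
  · have hGf : Gf (table.filter (fun c => decide (0 ≤ c.headD 0)))
        ((table.foldl (fun (rc : Int) (cell : List Int) => if rc < cell.headD 0 then cell.headD 0 else rc) 0).toNat + 1)
        = (List.range ((table.foldl (fun (rc : Int) (cell : List Int) => if rc < cell.headD 0 then cell.headD 0 else rc) 0).toNat + 1)).flatMap
            (fun r => grp table (Int.ofNat r)) := by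
      unfold Gf
      exact List.flatMap_congr (fun r _ => filter_nonneg_grp table r)
    rw [hGf, outerB]
  · intro x hx
    have hx0 : (0 : Int) ≤ x.headD 0 := by
      have := (List.mem_filter.mp hx).2
      simpa using this
    have hxle : x.headD 0 ≤ table.foldl (fun (rc : Int) (cell : List Int) => if rc < cell.headD 0 then cell.headD 0 else rc) 0 :=
      hle x (List.mem_filter.mp hx).1
    refine ⟨hx0, ?_⟩
    push_cast
    omega

theorem remove_blank_rows_spec : Claim_equal_remove_blank_rows := by
  intro table _ _
  unfold Spec_remove_blank_rows
  rw [A_eq_NT, B_eq_NT]
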